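-- pv_equiv track=rewrite | github.com/Aniruddha-Deb/COL100 | a4/ltest.py | lsum
-- ===== SOURCE A (Python) =====
-- import math
--
-- def lsum(k):
--     sum = 0
--     for i in range(1,k):
--         found = False
--         for j in range(0,int(math.sqrt(i)+1)):
--             if found:
--                 break
--             for k in range(j,int(math.sqrt(i)+1)):
--                 if j**2 + k**2 == i:
--                     sum += 1
--                     found = True
--                     break
--     return sum
-- ===== SOURCE B (Python) =====
-- import math
--
-- def lsum(k):
--     if k <= 1:
--         return 0
--     marks = [False] * k
--     for j in range(math.isqrt(k - 1) + 1):
--         for c in range(j, math.isqrt(k - 1 - j * j) + 1):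
--             marks[j * j + c * c] = True
--     return sum(marks[1:])
-- ===== Notes on version B (the rewrite author's own statement) =====
-- stated objective: faster
-- what changed: Replaces the per-i triple nested search (for each i in [1,k) scan all pairs j<=c up to sqrt(i)) by a single sieve that marks j*j+c*c in a boolean array for all pairs with j*j+c*c < k and counts the marks in [1,k).
import Mathlib
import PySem

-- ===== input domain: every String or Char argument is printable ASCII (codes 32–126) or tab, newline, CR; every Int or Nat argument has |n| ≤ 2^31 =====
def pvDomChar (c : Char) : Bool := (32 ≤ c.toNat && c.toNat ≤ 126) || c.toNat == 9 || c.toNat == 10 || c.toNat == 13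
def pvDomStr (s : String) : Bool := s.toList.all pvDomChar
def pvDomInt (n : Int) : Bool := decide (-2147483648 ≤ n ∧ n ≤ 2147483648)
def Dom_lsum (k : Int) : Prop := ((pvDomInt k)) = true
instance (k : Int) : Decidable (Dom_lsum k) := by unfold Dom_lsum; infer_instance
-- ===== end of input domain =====

-- B replaces A's per-i O(sqrt(i)) pair search by a single sieve marking j*j+c*c < k
-- in a boolean array and counting the marks (objective: faster, O(k) vs O(k^1.5)).

-- ===== PORT A =====
-- innermost loop 'for k in range(j, int(sqrt(i)+1)): if j**2+k**2 == i: sum += 1; found = True; break'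
-- (python's int(math.sqrt(i)+1) is ported as Int.sqrt i + 1, exact for the 0 ≤ i ≤ 2^31 of the domain)
def lsumInner (i j : Int) (cs : List Int) (sum : Int) (found : Bool) : Int × Bool :=
  match cs with
  | [] => (sum, found)
  | c :: rest =>
    if j * j + c * c = i then (sum + 1, true)
    else lsumInner i j rest sum found

-- middle loop 'for j in range(0, int(sqrt(i)+1)): if found: break; <inner loop>'
def lsumMid (i r : Int) (js : List Int) (sum : Int) (found : Bool) : Int × Bool :=
  match js with
  | [] => (sum, found)
  | j :: rest =>
    if found then (sum, found)
    else
      let p := lsumInner i j (PySem.List.pyRange j r 1) sum found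
      lsumMid i r rest p.1 p.2

def lsum (k : Int) : Int :=
  (PySem.List.pyRange 1 k 1).foldl
    (fun sum i => (lsumMid i (Int.sqrt i + 1) (PySem.List.pyRange 0 (Int.sqrt i + 1) 1) sum false).1)
    0

-- ===== PORT B =====
-- inner loop 'for c in range(j, isqrt(k-1-j*j)+1): marks[j*j+c*c] = True'
-- (the index j*j+c*c is nonnegative and < k wherever B writes, so .toNat set is exact)
def pvMarkRow (marks : List Bool) (j : Int) (cs : List Int) : List Bool :=
  match cs with
  | [] => marks
  | c :: rest => pvMarkRow (marks.set (j * j + c * c).toNat true) j rest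

-- outer loop 'for j in range(isqrt(k-1)+1): <inner loop>'
def pvSieve (marks : List Bool) (k : Int) (js : List Int) : List Bool :=
  match js with
  | [] => marks
  | j :: rest =>
      pvSieve (pvMarkRow marks j (PySem.List.pyRange j (Int.sqrt (k - 1 - j * j) + 1) 1)) k rest

-- 'sum(marks[1:])' = number of True entries after index 0 (ported as drop 1 / countP)
def lsum_alt (k : Int) : Int :=
  if k ≤ 1 then 0
  else
    (((pvSieve (List.replicate k.toNat false) k
        (PySem.List.pyRange 0 (Int.sqrt (k - 1) + 1) 1)).drop 1).countP (fun b => b) : Int)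

-- ===== PRECONDITION & SPEC =====
def Spec_lsum (k : Int) (out : Int) : Prop := out = lsum_alt k
instance (k : Int) (out : Int) : Decidable (Spec_lsum k out) := by unfold Spec_lsum; infer_instance

-- ===== CLAIM (what is proved, stated in full; the proofs are below) =====
def Claim_equal_lsum : Prop := ∀ (k : Int), Dom_lsum k → Spec_lsum k (lsum k)

-- ===== LEMMAS AND PROOFS =====

-- the mathematical predicate both programs test: i is a sum of two squares j² + c², 0 ≤ j ≤ c
def pvP (i : Int) : Prop := ∃ j c : Int, 0 ≤ j ∧ j ≤ c ∧ j * j + c * c = i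

-- A's per-i test, as an `any` over the two scanned ranges
def pvFA (i : Int) : Bool :=
  (PySem.List.pyRange 0 (Int.sqrt i + 1) 1).any fun j =>
    (PySem.List.pyRange j (Int.sqrt i + 1) 1).any fun c => decide (j * j + c * c = i)

-- B's per-index mark condition, as an `any` over the sieve's two ranges
def pvFB (k i : Int) : Bool :=
  (PySem.List.pyRange 0 (Int.sqrt (k - 1) + 1) 1).any fun j =>
    (PySem.List.pyRange j (Int.sqrt (k - 1 - j * j) + 1) 1).any fun c =>
      decide (j * j + c * c = i)

theorem pv_le_sqrt {c i : Int} (hc : 0 ≤ c) (hi : 0 ≤ i) :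
    c ≤ Int.sqrt i ↔ c * c ≤ i := by
  have h1 : c ≤ Int.sqrt i ↔ c.toNat ≤ Nat.sqrt i.toNat := by
    rw [show Int.sqrt i = ((Nat.sqrt i.toNat : ℕ) : ℤ) from rfl]
    omega
  rw [h1, Nat.le_sqrt]
  have h2 : (c.toNat : Int) = c := Int.toNat_of_nonneg hc
  have h3 : (i.toNat : Int) = i := Int.toNat_of_nonneg hi
  constructor <;> intro h
  · have := (Nat.cast_le (α := ℤ)).mpr h
    push_cast at this
    rw [h2, h3] at this
    exact this
  · apply (Nat.cast_le (α := ℤ)).mp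
    push_cast
    rw [h2, h3]
    exact h

theorem pvFA_iff (i : Int) (hi : 0 ≤ i) : pvFA i = true ↔ pvP i := by
  unfold pvFA
  rw [List.any_eq_true]
  constructor
  · rintro ⟨j, hj, hc⟩
    rw [List.any_eq_true] at hc
    obtain ⟨c, hcm, hEq⟩ := hc
    rw [PySem.List.mem_pyRange_one] at hj hcm
    exact ⟨j, c, hj.1, hcm.1, of_decide_eq_true hEq⟩
  · rintro ⟨j, c, hj0, hjc, he⟩
    have hc0 : 0 ≤ c := le_trans hj0 hjc
    have hcc : c * c ≤ i := by nlinarith [mul_self_nonneg j]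
    have hcs : c ≤ Int.sqrt i := (pv_le_sqrt hc0 hi).mpr hcc
    refine ⟨j, ?_, ?_⟩
    · rw [PySem.List.mem_pyRange_one]; exact ⟨hj0, by omega⟩
    · rw [List.any_eq_true]
      exact ⟨c, by rw [PySem.List.mem_pyRange_one]; exact ⟨hjc, by omega⟩,
        decide_eq_true he⟩

theorem pvFB_iff (k i : Int) (hi : 0 ≤ i) (hik : i < k) : pvFB k i = true ↔ pvP i := by
  unfold pvFB
  rw [List.any_eq_true]
  constructor
  · rintro ⟨j, hj, hc⟩
    rw [List.any_eq_true] at hc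
    obtain ⟨c, hcm, hEq⟩ := hc
    rw [PySem.List.mem_pyRange_one] at hj hcm
    exact ⟨j, c, hj.1, hcm.1, of_decide_eq_true hEq⟩
  · rintro ⟨j, c, hj0, hjc, he⟩
    have hc0 : 0 ≤ c := le_trans hj0 hjc
    have hk1 : 0 ≤ k - 1 := by nlinarith
    have hjj : j * j ≤ k - 1 := by nlinarith
    have hjs : j ≤ Int.sqrt (k - 1) := (pv_le_sqrt hj0 hk1).mpr hjj
    have hcc : c * c ≤ k - 1 - j * j := by nlinarith
    have hcs : c ≤ Int.sqrt (k - 1 - j * j) :=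
      (pv_le_sqrt hc0 (by nlinarith)).mpr hcc
    refine ⟨j, ?_, ?_⟩
    · rw [PySem.List.mem_pyRange_one]; exact ⟨hj0, by omega⟩
    · rw [List.any_eq_true]
      exact ⟨c, by rw [PySem.List.mem_pyRange_one]; exact ⟨hjc, by omega⟩,
        decide_eq_true he⟩

-- ---- A-side loop characterisation ----

theorem lsumInner_eq (i j : Int) (cs : List Int) (s : Int) :
    lsumInner i j cs s false =
      if cs.any (fun c => decide (j * j + c * c = i)) then (s + 1, true) else (s, false) := by
  induction cs with
  | nil => simp [lsumInner]
  | cons c rest ih =>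
    by_cases h : j * j + c * c = i
    · simp [lsumInner, h]
    · simp [lsumInner, h, ih]

theorem lsumMid_found (i r : Int) (js : List Int) (s : Int) :
    lsumMid i r js s true = (s, true) := by
  cases js with
  | nil => rfl
  | cons j rest => simp [lsumMid]

theorem lsumMid_eq (i r : Int) (js : List Int) (s : Int) :
    (lsumMid i r js s false).1 =
      if js.any (fun j => (PySem.List.pyRange j r 1).any fun c => decide (j * j + c * c = i))
      then s + 1 else s := by
  induction js generalizing s with
  | nil => simp [lsumMid]
  | cons j rest ih =>
    rcases Bool.eq_false_or_eq_true
        ((PySem.List.pyRange j r 1).any fun c => decide (j * j + c * c = i)) with h | h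
    · have e1 : lsumMid i r (j :: rest) s false = lsumMid i r rest (s + 1) true := by
        simp [lsumMid, lsumInner_eq, h]
      rw [e1, lsumMid_found, List.any_cons, h, Bool.true_or]
      simp
    · have e1 : lsumMid i r (j :: rest) s false = lsumMid i r rest s false := by
        simp [lsumMid, lsumInner_eq, h]
      rw [e1, ih, List.any_cons, h, Bool.false_or]

theorem pv_foldl_body (l : List Int) (s : Int) :
    l.foldl (fun sum i =>
        (lsumMid i (Int.sqrt i + 1) (PySem.List.pyRange 0 (Int.sqrt i + 1) 1) sum false).1) s
      = s + (l.countP pvFA : Int) := by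
  induction l generalizing s with
  | nil => simp
  | cons x xs ih =>
    rw [List.foldl_cons, lsumMid_eq, List.countP_cons]
    rw [show ((PySem.List.pyRange 0 (Int.sqrt x + 1) 1).any fun j =>
        (PySem.List.pyRange j (Int.sqrt x + 1) 1).any fun c => decide (j * j + c * c = x))
        = pvFA x from rfl]
    by_cases h : pvFA x = true
    · rw [if_pos h, if_pos h, ih]
      push_cast
      ring
    · rw [if_neg h, if_neg h, ih]
      simp

theorem lsum_eq_countP (k : Int) :
    lsum k = ((PySem.List.pyRange 1 k 1).countP pvFA : Int) := by
  unfold lsum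
  rw [pv_foldl_body]
  simp

-- ---- B-side sieve characterisation ----

theorem pvMarkRow_length (m : List Bool) (j : Int) (cs : List Int) :
    (pvMarkRow m j cs).length = m.length := by
  induction cs generalizing m with
  | nil => rfl
  | cons c rest ih => simp [pvMarkRow, ih]

theorem pvSieve_length (m : List Bool) (k : Int) (js : List Int) :
    (pvSieve m k js).length = m.length := by
  induction js generalizing m with
  | nil => rfl
  | cons j rest ih => simp [pvSieve, ih, pvMarkRow_length]

theorem pvMarkRow_get (m : List Bool) (j : Int) (cs : List Int) (n : Nat) (hn : n < m.length) :
    (pvMarkRow m j cs)[n]'(by rw [pvMarkRow_length]; exact hn) =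
      (m[n] || cs.any (fun c => decide (j * j + c * c = (n : Int)))) := by
  induction cs generalizing m hn with
  | nil => simp [pvMarkRow]
  | cons c rest ih =>
    have hn' : n < (m.set (j * j + c * c).toNat true).length := by simpa using hn
    have step := ih (m.set (j * j + c * c).toNat true) hn'
    have hpos : 0 ≤ j * j + c * c := by nlinarith [mul_self_nonneg j, mul_self_nonneg c]
    have hidx : ((j * j + c * c).toNat = n) ↔ (j * j + c * c = (n : Int)) := by omega
    simp only [pvMarkRow]
    rw [step, List.getElem_set]
    by_cases h : j * j + c * c = (n : Int)
    · rw [if_pos (hidx.mpr h)]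
      simp [h]
    · rw [if_neg (fun hc => h (hidx.mp hc))]
      simp [h]

theorem pvSieve_get (m : List Bool) (k : Int) (js : List Int) (n : Nat) (hn : n < m.length) :
    (pvSieve m k js)[n]'(by rw [pvSieve_length]; exact hn) =
      (m[n] || js.any (fun j =>
        (PySem.List.pyRange j (Int.sqrt (k - 1 - j * j) + 1) 1).any
          (fun c => decide (j * j + c * c = (n : Int))))) := by
  induction js generalizing m hn with
  | nil => simp [pvSieve]
  | cons j rest ih =>
    have hn' : n < (pvMarkRow m j (PySem.List.pyRange j (Int.sqrt (k - 1 - j * j) + 1) 1)).length := by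
      rw [pvMarkRow_length]; exact hn
    have step := ih (pvMarkRow m j (PySem.List.pyRange j (Int.sqrt (k - 1 - j * j) + 1) 1)) hn'
    simp only [pvSieve]
    rw [step, pvMarkRow_get m j _ n hn]
    simp [Bool.or_assoc]

theorem pvSieve_eq_map (k : Int) :
    pvSieve (List.replicate k.toNat false) k (PySem.List.pyRange 0 (Int.sqrt (k - 1) + 1) 1)
      = (List.range k.toNat).map (fun n : Nat => pvFB k (n : Int)) := by
  apply List.ext_getElem
  · simp [pvSieve_length]
  · intro n h1 h2
    have hn : n < (List.replicate k.toNat false).length := by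
      simpa [pvSieve_length] using h1
    rw [pvSieve_get (List.replicate k.toNat false) k _ n hn, List.getElem_map,
      List.getElem_range]
    simp [pvFB]

-- ===== VERDICT (by name: the statement is the Claim_ definition above) =====
theorem lsum_spec : Claim_equal_lsum := by
  intro k _
  unfold Spec_lsum lsum_alt
  by_cases hk : k ≤ 1
  · rw [if_pos hk, lsum_eq_countP, PySem.List.pyRange_one_eq_nil hk]
    rfl
  · rw [if_neg hk]
    rw [not_le] at hk
    rw [lsum_eq_countP, pvSieve_eq_map]
    have hm : (k - 1).toNat + 1 = k.toNat := by omega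
    rw [← hm, List.range_succ_eq_map]
    simp only [List.map_cons, List.map_map, List.drop_one, List.tail_cons, List.countP_map]
    rw [PySem.List.pyRange_one, List.countP_map]
    congr 1
    apply List.countP_congr
    intro n hn
    rw [List.mem_range] at hn
    simp only [Function.comp_apply]
    have h0 : (0 : Int) ≤ 1 + (n : Int) := by positivity
    have hlt : 1 + (n : Int) < k := by omega
    have e : ((Nat.succ n : Nat) : Int) = 1 + (n : Int) := by push_cast; ring
    rw [e]
    exact (pvFA_iff _ h0).trans ((pvFB_iff k _ h0 hlt).symm)
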